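-- pv_equiv track=rewrite | github.com/modoojunko/my-novel-skill | src/export.py | strip_frontmatter
-- ===== SOURCE A (Python) =====
-- def strip_frontmatter(content: str) -> str:
--     """去除 Markdown 的 frontmatter"""
--     lines = content.split('\n')
--     result_lines = []
--     in_frontmatter = False
--
--     for line in lines:
--         if line.strip() == '---':
--             in_frontmatter = not in_frontmatter
--             continue
--         if in_frontmatter:
--             continue
--         # 跳过章节标题行（# 标题）
--         if line.startswith('# '):
--             continue
--         result_lines.append(line)
--
--     return '\n'.join(result_lines).strip()
-- ===== SOURCE B (Python) =====
-- def strip_frontmatter(content: str) -> str: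
--     """去除 Markdown 的 frontmatter"""
--     # Phase 1: partition the lines into groups delimited by '---' marker lines.
--     groups = [[]]
--     for line in content.split('\n'):
--         if line.strip() == '---':
--             groups.append([])
--         else:
--             groups[-1].append(line)
--     # Phase 2: keep the even-indexed groups (outside frontmatter), drop headings.
--     kept = []
--     for i, g in enumerate(groups):
--         if i % 2 == 0:
--             for line in g:
--                 if not line.startswith('# '):
--                     kept.append(line)
--     return '\n'.join(kept).strip()
-- ===== Notes on version B (the rewrite author's own statement) =====
-- stated objective: alternative
-- what changed: Replaces A's single pass with an in_frontmatter toggle by a two-phase decomposition: partition the lines into groups delimited by the frontmatter marker lines, then keep only the even-indexed groups and drop heading lines from them.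
import Mathlib
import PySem

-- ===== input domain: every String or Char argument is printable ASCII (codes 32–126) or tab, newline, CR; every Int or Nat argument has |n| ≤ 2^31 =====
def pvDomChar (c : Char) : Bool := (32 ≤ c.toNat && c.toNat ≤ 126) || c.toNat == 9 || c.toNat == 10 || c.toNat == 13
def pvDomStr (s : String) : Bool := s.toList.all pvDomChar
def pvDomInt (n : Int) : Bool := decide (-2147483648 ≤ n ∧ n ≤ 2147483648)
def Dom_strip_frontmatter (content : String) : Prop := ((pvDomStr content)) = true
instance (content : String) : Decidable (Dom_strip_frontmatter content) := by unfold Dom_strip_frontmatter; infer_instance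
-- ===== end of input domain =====

-- B replaces A's toggle-per-line scan by a two-phase decomposition: partition the
-- lines into '---'-delimited groups, then keep the even-indexed groups (objective: alternative).

-- ===== PORT A =====
-- the for-loop over lines with state (result_lines, in_frontmatter)
def stripFmGoA : List String → List String → Bool → List String
  | [], res, _ => res
  | l :: ls, res, f =>
    if PySem.Str.strip l == "---" then stripFmGoA ls res (!f)
    else if f then stripFmGoA ls res f
    else if PySem.Str.startswith l "# " then stripFmGoA ls res f
    else stripFmGoA ls (res ++ [l]) f

def strip_frontmatter (content : String) : String :=
  PySem.Str.strip (PySem.Str.join "\n" (stripFmGoA ((PySem.Str.split? content "\n").getD []) [] false))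

-- ===== PORT B =====
-- groups[-1].append(line)
def bUpdateLast : List (List String) → String → List (List String)
  | [], _ => []
  | [g], l => [g ++ [l]]
  | g :: g' :: gs, l => g :: bUpdateLast (g' :: gs) l

-- phase 1: partition into '---'-delimited groups
def bGroups : List String → List (List String) → List (List String)
  | [], gs => gs
  | l :: ls, gs =>
    if PySem.Str.strip l == "---" then bGroups ls (gs ++ [[]])
    else bGroups ls (bUpdateLast gs l)

-- phase 2: for i, g in enumerate(groups): keep even-indexed groups, drop headings
def bKept : List (List String) → Nat → List String → List String
  | [], _, acc => acc
  | g :: gs, i, acc =>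
    bKept gs (i + 1)
      (if i % 2 == 0 then acc ++ g.filter (fun l => !PySem.Str.startswith l "# ") else acc)

def strip_frontmatter_alt (content : String) : String :=
  PySem.Str.strip (PySem.Str.join "\n" (bKept (bGroups ((PySem.Str.split? content "\n").getD []) [[]]) 0 []))

-- ===== PRECONDITION & SPEC =====
def Spec_strip_frontmatter (content : String) (out : String) : Prop := out = strip_frontmatter_alt content
instance (content : String) (out : String) : Decidable (Spec_strip_frontmatter content out) := by unfold Spec_strip_frontmatter; infer_instance

-- ===== CLAIM (what is proved, stated in full; the proofs are below) =====
def Claim_equal_strip_frontmatter : Prop := ∀ (content : String), Dom_strip_frontmatter content → Spec_strip_frontmatter content (strip_frontmatter content)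

-- ===== LEMMAS AND PROOFS =====

-- accumulator-free form of A's loop
def aPure : List String → Bool → List String
  | [], _ => []
  | l :: ls, f =>
    if PySem.Str.strip l == "---" then aPure ls (!f)
    else if f then aPure ls f
    else if PySem.Str.startswith l "# " then aPure ls f
    else l :: aPure ls f

theorem goA_eq (ls : List String) : ∀ res f, stripFmGoA ls res f = res ++ aPure ls f := by
  induction ls with
  | nil => simp [stripFmGoA, aPure]
  | cons l ls ih =>
    intro res f
    simp only [stripFmGoA, aPure]
    split_ifs <;> simp [ih]

theorem bUpdateLast_length (gs : List (List String)) (l : String) :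
    (bUpdateLast gs l).length = gs.length := by
  induction gs with
  | nil => simp [bUpdateLast]
  | cons g gs ih =>
    cases gs with
    | nil => simp [bUpdateLast]
    | cons g' gs' => simpa [bUpdateLast] using ih

theorem bKept_append_empty (gs : List (List String)) : ∀ i acc,
    bKept (gs ++ [[]]) i acc = bKept gs i acc := by
  induction gs with
  | nil => intro i acc; simp [bKept]
  | cons g gs ih => intro i acc; simp only [List.cons_append, bKept, ih]

theorem bKept_updateLast (gs : List (List String)) (hne : gs ≠ []) : ∀ i acc l,
    bKept (bUpdateLast gs l) i acc =
      bKept gs i acc ++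
        (if (i + gs.length - 1) % 2 == 0 then
          (if PySem.Str.startswith l "# " then [] else [l]) else []) := by
  induction gs with
  | nil => exact absurd rfl hne
  | cons g gs ih =>
    intro i acc l
    cases gs with
    | nil =>
      simp only [bUpdateLast, bKept, List.length_cons, List.length_nil, Nat.zero_add,
        Nat.add_sub_cancel]
      by_cases h : i % 2 == 0 <;>
        by_cases hh : PySem.Chars.startswith l.toList ['#', ' '] <;>
          simp [h, hh, List.filter_append, List.filter]
    | cons g' gs' =>
      simp only [bUpdateLast, bKept]
      rw [ih (by simp)]
      congr 1
      have : (i + 1) + (g' :: gs').length - 1 = i + (g :: g' :: gs').length - 1 := by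
        simp; omega
      rw [this]

theorem parity_flip (n : ℕ) : (decide ((n + 1) % 2 = 1)) = !(decide (n % 2 = 1)) := by
  rcases Nat.mod_two_eq_zero_or_one n with h | h <;> simp [Nat.add_mod, h]

theorem main_lemma (ls : List String) : ∀ gs i acc, gs ≠ [] →
    bKept (bGroups ls gs) i acc =
      bKept gs i acc ++ aPure ls (decide ((i + gs.length - 1) % 2 = 1)) := by
  induction ls with
  | nil => intro gs i acc _; simp [bGroups, aPure]
  | cons l ls ih =>
    intro gs i acc hne
    have hlen : 1 ≤ gs.length := List.length_pos_iff.mpr hne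
    simp only [bGroups, aPure]
    by_cases hm : PySem.Str.strip l == "---"
    · simp only [hm, if_true]
      rw [ih (gs ++ [[]]) i acc (by simp), bKept_append_empty]
      congr 2
      have h1 : i + (gs ++ [[]]).length - 1 = (i + gs.length - 1) + 1 := by simp; omega
      rw [h1, parity_flip]
    · simp only [hm, Bool.false_eq_true, if_false]
      rw [ih (bUpdateLast gs l) i acc
            (by intro h; have := bUpdateLast_length gs l; rw [h] at this; simp at this; omega),
          bKept_updateLast gs hne i acc l, bUpdateLast_length]
      rcases Nat.mod_two_eq_zero_or_one (i + gs.length - 1) with hp | hp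
      · by_cases hh : PySem.Chars.startswith l.toList ['#', ' '] <;> simp [hp, hh]
      · simp [hp]

-- ===== VERDICT (by name: the statement is the Claim_ definition above) =====
theorem strip_frontmatter_spec : Claim_equal_strip_frontmatter := by
  intro content _
  unfold Spec_strip_frontmatter strip_frontmatter strip_frontmatter_alt
  rw [goA_eq, main_lemma _ [[]] 0 [] (by simp)]
  simp [bKept]
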